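-- pv_equiv track=rewrite | github.com/woobly-bop/AI-Assisted-GitHub-Activity-Pattern-Analyzer | backend/utils.py | validate_github_username
-- ===== SOURCE A (Python) =====
-- def validate_github_username(username):
--     """
--     Validate GitHub username format
--
--     Args:
--         username (str): Username to validate
--
--     Returns:
--         bool: True if valid, False otherwise
--     """
--     if not username:
--         return False
--
--     # GitHub username rules:
--     # - May only contain alphanumeric characters or hyphens
--     # - Cannot have multiple consecutive hyphens
--     # - Cannot begin or end with a hyphen
--     # - Maximum 39 characters
--
--     if len(username) > 39:
--         return False
--
--     if username.startswith('-') or username.endswith('-'):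
--         return False
--
--     if '--' in username:
--         return False
--
--     return all(c.isalnum() or c == '-' for c in username)
-- ===== SOURCE B (Python) =====
-- def validate_github_username(username):
--     n = len(username)
--     if n == 0 or n > 39:
--         return False
--     prev_hyphen = False
--     for i, c in enumerate(username):
--         if c == '-':
--             if i == 0 or i == n - 1 or prev_hyphen:
--                 return False
--             prev_hyphen = True
--         elif c.isalnum():
--             prev_hyphen = False
--         else:
--             return False
--     return True
-- ===== Notes on version B (the rewrite author's own statement) =====
-- stated objective: alternative
-- what changed: Replaces A's four separate scans (startswith/endswith, double-hyphen substring search, all()) with one indexed pass tracking a previous-hyphen flag.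
import Mathlib
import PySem

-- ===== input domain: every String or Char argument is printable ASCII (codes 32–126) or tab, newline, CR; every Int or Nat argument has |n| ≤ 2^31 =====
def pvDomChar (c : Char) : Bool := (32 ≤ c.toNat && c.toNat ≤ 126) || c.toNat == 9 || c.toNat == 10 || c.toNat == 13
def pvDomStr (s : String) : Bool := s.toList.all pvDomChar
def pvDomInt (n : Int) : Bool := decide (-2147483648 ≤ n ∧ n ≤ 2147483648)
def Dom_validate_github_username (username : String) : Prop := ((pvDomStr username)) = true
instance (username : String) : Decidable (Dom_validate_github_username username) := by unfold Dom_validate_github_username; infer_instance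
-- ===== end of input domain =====

-- B merges A's four scans (startswith/endswith '-', double-hyphen substring search, all()) into one indexed pass; same cost, different decomposition.

-- ===== PORT A =====
def validate_github_username (username : String) : Bool :=
  if username = "" then false
  else if PySem.Str.len username > 39 then false
  else if PySem.Str.startswith username "-" || PySem.Str.endswith username "-" then false
  else if PySem.Str.isIn "--" username then false
  else username.toList.all (fun c => PySem.Chars.isalnum c || decide (c = '-'))

-- ===== PORT B =====
def vguAltLoop (n : Nat) : Nat → Bool → List Char → Bool
  | _, _, [] => true
  | i, prev, c :: rest =>
    if c = '-' then
      if i = 0 || i = n - 1 || prev then false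
      else vguAltLoop n (i + 1) true rest
    else if PySem.Chars.isalnum c then vguAltLoop n (i + 1) false rest
    else false

def validate_github_username_alt (username : String) : Bool :=
  let n := username.toList.length
  if n = 0 || n > 39 then false
  else vguAltLoop n 0 false username.toList

-- ===== PRECONDITION & SPEC =====
def Spec_validate_github_username (username : String) (out : Bool) : Prop := out = validate_github_username_alt username
instance (username : String) (out : Bool) : Decidable (Spec_validate_github_username username out) := by unfold Spec_validate_github_username; infer_instance

-- ===== CLAIM (what is proved, stated in full; the proofs are below) =====
def Claim_equal_validate_github_username : Prop := ∀ (username : String), Dom_validate_github_username username → Spec_validate_github_username username (validate_github_username username)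

-- ===== LEMMAS AND PROOFS =====

-- structural version of B's loop (prev-hyphen flag, position encoded by 'rest = []')
def vguG : Bool → List Char → Bool
  | _, [] => true
  | prev, c :: rest =>
    if c = '-' then
      if prev || rest.isEmpty then false else vguG true rest
    else if PySem.Chars.isalnum c then vguG false rest
    else false

lemma vguAltLoop_eq_g (l : List Char) : ∀ (i : Nat) (prev : Bool), 0 < i →
    vguAltLoop (i + l.length) i prev l = vguG prev l := by
  induction l with
  | nil => intro i prev _; rfl
  | cons c rest ih =>
    intro i prev hi
    have e0 : decide (i = 0) = false := by simp; omega
    have e1 : decide (i = i + (c :: rest).length - 1) = rest.isEmpty := by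
      cases rest <;> simp
    have hn : i + (c :: rest).length = (i + 1) + rest.length := by simp; omega
    have hrec1 : vguAltLoop (i + (c :: rest).length) (i + 1) true rest = vguG true rest := by
      rw [hn]; exact ih (i + 1) true (by omega)
    have hrec2 : vguAltLoop (i + (c :: rest).length) (i + 1) false rest = vguG false rest := by
      rw [hn]; exact ih (i + 1) false (by omega)
    simp only [vguAltLoop, vguG, e0, e1, Bool.false_or, hrec1, hrec2, Bool.or_comm]

-- characterisation of the structural loop by A's four conditions
lemma vguG_char : ∀ (prev : Bool) (l : List Char),
    vguG prev l =
      (l.all (fun c => PySem.Chars.isalnum c || decide (c = '-')) &&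
       !decide (['-', '-'] <:+: l) &&
       !decide (l.getLast? = some '-') &&
       !(prev && decide (l.head? = some '-'))) := by
  intro prev l
  induction l generalizing prev with
  | nil => simp [vguG]
  | cons c rest ih =>
    have hinf : (['-', '-'] <:+: c :: rest) ↔
        (c = '-' ∧ rest.head? = some '-') ∨ ['-', '-'] <:+: rest := by
      rw [List.infix_cons_iff]
      constructor
      · rintro (h | h)
        · left
          rcases h with ⟨t, ht⟩
          cases rest with
          | nil => simp at ht
          | cons d t' =>
            injection ht with h1 h2; injection h2 with h2 h3
            exact ⟨h1.symm, by simp [h2.symm]⟩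
        · right; exact h
      · rintro (⟨h1, h2⟩ | h)
        · left
          cases rest with
          | nil => simp at h2
          | cons d t' =>
            simp at h2
            exact ⟨t', by simp [h1, h2]⟩
        · right; exact h
    simp only [vguG]
    by_cases hc : c = '-'
    · subst hc
      by_cases hp : prev
      · simp [hp]
      · by_cases hr : rest.isEmpty
        · cases rest with
          | nil => simp [hp]
          | cons d t => simp at hr
        · cases rest with
          | nil => simp at hr
          | cons d t =>
            simp only [hp, Bool.false_eq_true, List.isEmpty_cons, Bool.false_or, if_false,
              Bool.false_eq_true, or_self]
            rw [ih true]
            by_cases hd : d = '-'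
            · subst hd
              have hI : ['-', '-'] <:+: ('-' :: '-' :: t) := ⟨[], t, rfl⟩
              simp [hI]
            · have hII : (['-', '-'] <:+: '-' :: d :: t) ↔ ['-', '-'] <:+: d :: t := by
                rw [hinf]; simp [hd]
              have hL' : (('-' : Char) :: d :: t).getLast? = (d :: t).getLast? :=
                List.getLast?_cons_cons
              simp [hII, hL', hd]
    · by_cases ha : PySem.Chars.isalnum c
      · simp only [if_neg hc, ha, if_true]
        rw [ih false]
        have hinf' : (['-', '-'] <:+: c :: rest) ↔ ['-', '-'] <:+: rest := by
          rw [hinf]; simp [hc]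
        cases rest with
        | nil => simp [hc, ha, hinf']
        | cons d t =>
          simp [hc, ha, hinf', List.getLast?_cons_cons]
      · simp [hc, ha]

-- head/last bridges for A's startswith/endswith
lemma vgu_starts (s : String) :
    PySem.Str.startswith s "-" = decide (s.toList.head? = some '-') := by
  simp only [PySem.Str.startswith_eq]
  rw [Bool.eq_iff_iff, PySem.Chars.startswith_iff]
  cases s.toList with
  | nil => simp
  | cons c t => simp [List.cons_prefix_cons, eq_comm]

lemma vgu_ends (s : String) :
    PySem.Str.endswith s "-" = decide (s.toList.getLast? = some '-') := by
  simp only [PySem.Str.endswith_eq]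
  rw [Bool.eq_iff_iff, PySem.Chars.endswith_iff]
  constructor
  · rintro ⟨t, ht⟩
    rw [← ht]; simp [List.getLast?_append]
  · intro h
    simp only [decide_eq_true_eq] at h
    rcases List.eq_nil_or_concat s.toList with hnil | ⟨t, a, hta⟩
    · rw [hnil] at h; simp at h
    · rw [hta] at h ⊢
      simp [List.getLast?_concat] at h
      exact ⟨t, by simp [h]⟩

-- ===== VERDICT (by name: the statement is the Claim_ definition above) =====
theorem validate_github_username_spec : Claim_equal_validate_github_username := by
  intro username _
  unfold Spec_validate_github_username validate_github_username validate_github_username_alt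
  by_cases hemp : username = ""
  · subst hemp; rfl
  · have hne : username.toList ≠ [] := by
      intro h; apply hemp
      have := congrArg String.ofList h
      simpa using this
    rw [if_neg hemp]
    have hAlen : (PySem.Str.len username > 39) ↔ (username.toList.length > 39) := by
      rw [PySem.Str.len_eq]; exact_mod_cast Iff.rfl
    by_cases hbig : username.toList.length > 39
    · rw [if_pos (hAlen.mpr hbig)]
      have hcond : (decide (username.toList.length = 0) || decide (username.toList.length > 39)) = true := by
        simp only [Bool.or_eq_true, decide_eq_true_eq]
        exact Or.inr hbig
      simp only [hcond, if_true]
    · rw [if_neg (fun h => hbig (hAlen.mp h))]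
      have hcond : (decide (username.toList.length = 0) || decide (username.toList.length > 39)) = false := by
        simp only [Bool.or_eq_false_iff, decide_eq_false_iff_not]
        exact ⟨by simpa [List.length_eq_zero_iff] using hne, hbig⟩
      simp only [hcond, Bool.false_eq_true, if_false]
      rw [vgu_starts, vgu_ends]
      cases hl : username.toList with
      | nil => exact absurd hl hne
      | cons c rest =>
        have hrest : vguAltLoop (c :: rest).length 1 false rest = vguG false rest := by
          have := vguAltLoop_eq_g rest 1 false (by omega)
          simpa [Nat.add_comm] using this
        have hisin : PySem.Str.isIn "--" username = decide (['-', '-'] <:+: c :: rest) := by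
          rw [Bool.eq_iff_iff, PySem.Str.isIn_iff_infix, hl]
          simp
        rw [hisin]
        simp only [vguAltLoop]
        by_cases hc : c = '-'
        · simp [hc]
        · simp only [if_neg hc, List.head?_cons, Option.some.injEq, decide_eq_true_eq]
          by_cases ha : PySem.Chars.isalnum c
          · simp only [ha, if_true]
            rw [show (0 : Nat) + 1 = 1 from rfl, hrest, vguG_char false rest]
            have hinf : (['-', '-'] <:+: c :: rest) ↔ ['-', '-'] <:+: rest := by
              rw [List.infix_cons_iff]
              constructor
              · rintro (⟨t, ht⟩ | h)
                · exfalso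
                  cases rest with
                  | nil => simp at ht
                  | cons d t' => injection ht with h1 _; exact hc h1.symm
                · exact h
              · exact fun h => Or.inr h
            by_cases hif : ['-', '-'] <:+: rest
            · simp [hif, hinf.mpr hif]
            · have hnif : ¬ ['-', '-'] <:+: c :: rest := fun h => hif (hinf.mp h)
              cases rest with
              | nil => simp [hc, ha, hif, hnif]
              | cons d t =>
                simp [hc, ha, hif, hnif, List.getLast?_cons_cons, Bool.and_comm]
          · simp [ha, hc]
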